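-- pv_equiv track=rewrite | github.com/Flexlolo/aoc2021 | 22/go.py | overlap_ranges
-- ===== SOURCE A (Python) =====
-- def overlap_ranges(range1, range2):
-- 	results = []
--
-- 	for r1, r2 in zip(range1, range2):
-- 		overlap = False
-- 		contains = False
-- 		overlap_range = (0,0)
--
-- 		for i in range(2):
-- 			if i:
-- 				a, b = r2, r1
-- 			else:
-- 				a, b = r1, r2
--
-- 			# overlap from left
-- 			if b[0] <= a[0] <= b[1]:
-- 				if a[1] <= b[1]:
-- 					# contains?
-- 					contains = True
-- 					overlap_range = (a[0], a[1])
-- 				else: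
-- 					# overlaps?
-- 					overlap_range = (a[0], b[1])
--
-- 				overlap = True
-- 				break
--
-- 			# overlap from right
-- 			if b[0] <= a[1] <= b[1]:
-- 				if a[0] >= b[0]:
-- 					# contains
-- 					contains = True
-- 					overlap_range = (a[0], a[1])
-- 				else:
-- 					# overlap
-- 					overlap_range = (b[0], a[1])
--
-- 				overlap = True
-- 				break
--
-- 		results.append((overlap, overlap_range))
--
-- 	overlap_all = all(o[0] for o in results)
-- 	overlap = [o[1] for o in results]
--
-- 	return overlap_all, overlap
-- ===== SOURCE B (Python) =====
-- def overlap_ranges(range1, range2):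
-- 	results = []
-- 	for (a0, a1), (b0, b1) in zip(range1, range2):
-- 		hit = (b0 <= a0 <= b1) or (b0 <= a1 <= b1) or (a0 <= b0 <= a1) or (a0 <= b1 <= a1)
-- 		results.append((True, (max(a0, b0), min(a1, b1))) if hit else (False, (0, 0)))
-- 	return all(flag for flag, _ in results), [r for _, r in results]
-- ===== Notes on version B (the rewrite author's own statement) =====
-- stated objective: simpler
-- what changed: Replaces A's two-direction loop (with break, contains flag and four nested range-construction branches) by a single pass that tests the symmetric endpoint-membership disjunction and builds the range directly as (max of starts, min of ends).
import Mathlib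
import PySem

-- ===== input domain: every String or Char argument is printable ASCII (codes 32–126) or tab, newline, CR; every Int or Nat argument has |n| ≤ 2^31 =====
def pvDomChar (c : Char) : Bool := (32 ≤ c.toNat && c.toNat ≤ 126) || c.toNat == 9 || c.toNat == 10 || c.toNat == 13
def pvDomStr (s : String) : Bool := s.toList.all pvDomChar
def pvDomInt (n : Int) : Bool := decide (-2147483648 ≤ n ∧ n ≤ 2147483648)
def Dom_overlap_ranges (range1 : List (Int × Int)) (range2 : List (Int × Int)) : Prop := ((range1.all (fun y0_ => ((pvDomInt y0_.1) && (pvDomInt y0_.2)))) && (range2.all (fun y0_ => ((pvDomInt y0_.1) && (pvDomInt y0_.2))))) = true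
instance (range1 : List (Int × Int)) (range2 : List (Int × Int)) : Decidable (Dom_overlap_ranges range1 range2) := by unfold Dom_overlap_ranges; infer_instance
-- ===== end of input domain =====

-- B replaces A's two-direction case analysis by one closed-form endpoint test per pair; objective: simpler.

-- ===== PORT A =====
-- one iteration of A's inner 'for i in range(2)' body (a, b fixed); some = break with this pair's result
def overlapA_dir (a b : Int × Int) : Option (Bool × (Int × Int)) :=
  if b.1 ≤ a.1 ∧ a.1 ≤ b.2 then
    -- overlap from left; 'contains' only toggles a local flag A never returns
    some (true, if a.2 ≤ b.2 then (a.1, a.2) else (a.1, b.2))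
  else if b.1 ≤ a.2 ∧ a.2 ≤ b.2 then
    -- overlap from right
    some (true, if a.1 ≥ b.1 then (a.1, a.2) else (b.1, a.2))
  else none

-- the inner loop unrolled: i = 0 (a=r1, b=r2), then i = 1 (a=r2, b=r1), else no overlap
def overlapA_pair (r1 r2 : Int × Int) : Bool × (Int × Int) :=
  match overlapA_dir r1 r2 with
  | some r => r
  | none =>
    match overlapA_dir r2 r1 with
    | some r => r
    | none => (false, (0, 0))

def overlap_ranges (range1 : List (Int × Int)) (range2 : List (Int × Int)) : Bool × (List (Int × Int)) :=
  let results := (List.zip range1 range2).map (fun p => overlapA_pair p.1 p.2)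
  (results.all (fun o => o.1), results.map (fun o => o.2))

-- ===== PORT B =====
def overlapB_pair (r1 r2 : Int × Int) : Bool × (Int × Int) :=
  if (r2.1 ≤ r1.1 ∧ r1.1 ≤ r2.2) ∨ (r2.1 ≤ r1.2 ∧ r1.2 ≤ r2.2) ∨
     (r1.1 ≤ r2.1 ∧ r2.1 ≤ r1.2) ∨ (r1.1 ≤ r2.2 ∧ r2.2 ≤ r1.2) then
    (true, (max r1.1 r2.1, min r1.2 r2.2))
  else (false, (0, 0))

def overlap_ranges_alt (range1 : List (Int × Int)) (range2 : List (Int × Int)) : Bool × (List (Int × Int)) :=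
  let results := (List.zip range1 range2).map (fun p => overlapB_pair p.1 p.2)
  (results.all (fun o => o.1), results.map (fun o => o.2))

-- ===== PRECONDITION & SPEC =====
def Spec_overlap_ranges (range1 : List (Int × Int)) (range2 : List (Int × Int)) (out : Bool × (List (Int × Int))) : Prop := out = overlap_ranges_alt range1 range2
instance (range1 : List (Int × Int)) (range2 : List (Int × Int)) (out : Bool × (List (Int × Int))) : Decidable (Spec_overlap_ranges range1 range2 out) := by unfold Spec_overlap_ranges; infer_instance

-- ===== CLAIM (what is proved, stated in full; the proofs are below) =====
def Claim_equal_overlap_ranges : Prop := ∀ (range1 : List (Int × Int)) (range2 : List (Int × Int)), Dom_overlap_ranges range1 range2 → Spec_overlap_ranges range1 range2 (overlap_ranges range1 range2)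

-- ===== LEMMAS AND PROOFS =====
theorem pair_eq (r1 r2 : Int × Int) : overlapA_pair r1 r2 = overlapB_pair r1 r2 := by
  obtain ⟨a0, a1⟩ := r1
  obtain ⟨b0, b1⟩ := r2
  simp only [overlapA_pair, overlapA_dir, overlapB_pair]
  split_ifs <;> simp_all [Prod.ext_iff, max_def, min_def] <;> omega

-- ===== VERDICT (by name: the statement is the Claim_ definition above) =====
theorem overlap_ranges_spec : Claim_equal_overlap_ranges := by
  intro range1 range2 _
  unfold Spec_overlap_ranges overlap_ranges overlap_ranges_alt
  simp only [pair_eq]
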